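-- pv_equiv track=rewrite | github.com/ricsinaruto/brain-gen | brain_gen/models/tokenizers/factorized.py | _normalize_factors
-- ===== SOURCE A (Python) =====
-- import math
-- from typing import Optional, Tuple
--
-- def _normalize_factors(
--     total: int, factors: Optional[Tuple[int, ...]], name: str
-- ) -> Tuple[int, ...]:
--     if total < 1:
--         raise ValueError(f"{name} must be >= 1, got {total}")
--     if factors is None:
--         if total == 1:
--             return ()
--         remaining = total
--         out = []
--         while remaining % 2 == 0 and remaining > 1:
--             out.append(2)
--             remaining //= 2
--         if remaining > 1:
--             out.append(remaining)
--         return tuple(out)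
--
--     factors = tuple(int(f) for f in factors)
--     if any(f < 1 for f in factors):
--         raise ValueError(f"All {name} factors must be >= 1, got {factors}")
--     if math.prod(factors) != total:
--         raise ValueError(
--             f"{name} factors product {math.prod(factors)} != total {total}"
--         )
--     return factors
-- ===== SOURCE B (Python) =====
-- import math
-- from typing import Optional, Tuple
--
--
-- def _normalize_factors(
--     total: int, factors: Optional[Tuple[int, ...]], name: str
-- ) -> Tuple[int, ...]:
--     if total < 1:
--         raise ValueError(f"{name} must be >= 1, got {total}")
--     if factors is None:
--         if total == 1:
--             return ()
--         # closed-form: k = number of factors of 2, via the lowest-set-bit trick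
--         k = (total & -total).bit_length() - 1
--         remaining = total >> k
--         return (2,) * k + ((remaining,) if remaining > 1 else ())
--
--     factors = tuple(int(f) for f in factors)
--     if any(f < 1 for f in factors):
--         raise ValueError(f"All {name} factors must be >= 1, got {factors}")
--     if math.prod(factors) != total:
--         raise ValueError(
--             f"{name} factors product {math.prod(factors)} != total {total}"
--         )
--     return factors
-- ===== Notes on version B (the rewrite author's own statement) =====
-- stated objective: alternative
-- what changed: the while-division loop that peels factors of 2 one at a time is replaced by a closed-form bit computation: k = (total & -total).bit_length() - 1 gives the number of 2-factors at once and remaining = total >> k the odd part; the guard and the validate branch are unchanged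
import Mathlib
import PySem

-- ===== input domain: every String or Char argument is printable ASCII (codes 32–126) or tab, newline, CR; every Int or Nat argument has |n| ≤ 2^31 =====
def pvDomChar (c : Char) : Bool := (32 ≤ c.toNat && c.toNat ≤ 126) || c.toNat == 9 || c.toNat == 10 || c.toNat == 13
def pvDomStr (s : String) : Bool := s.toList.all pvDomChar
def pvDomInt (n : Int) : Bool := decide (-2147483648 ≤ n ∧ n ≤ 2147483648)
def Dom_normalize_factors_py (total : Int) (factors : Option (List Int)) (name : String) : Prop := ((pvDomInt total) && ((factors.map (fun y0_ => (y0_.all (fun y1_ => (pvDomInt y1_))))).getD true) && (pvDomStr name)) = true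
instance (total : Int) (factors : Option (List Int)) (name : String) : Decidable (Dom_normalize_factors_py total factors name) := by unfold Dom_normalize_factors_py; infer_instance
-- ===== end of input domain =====

-- B replaces A's while-division loop by a closed-form lowest-set-bit computation of the
-- number of 2-factors; guard and validate branch are unchanged (objective: alternative).

-- ===== PORT A =====
-- A's while loop: 'while remaining % 2 == 0 and remaining > 1: out.append(2); remaining //= 2'
def pvA_loop (remaining : Int) (out : List Int) : Int × List Int :=
  if PySem.Int.mod remaining 2 = 0 ∧ remaining > 1 then
    pvA_loop (PySem.Int.floordiv remaining 2) (out ++ [2])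
  else (remaining, out)
termination_by remaining.toNat
decreasing_by
  rename_i h
  rw [PySem.Int.floordiv_eq_ediv_of_pos (by omega)]
  omega

def normalize_factors_py (total : Int) (factors : Option (List Int)) (name : String) : List Int :=
  if total < 1 then []  -- raise ValueError (excluded by Pre_)
  else
    match factors with
    | none =>
      if total = 1 then []
      else  -- 'if remaining > 1: out.append(remaining); return tuple(out)'
        if (pvA_loop total []).1 > 1 then (pvA_loop total []).2 ++ [(pvA_loop total []).1]
        else (pvA_loop total []).2
    | some fs =>
      -- 'tuple(int(f) for f in factors)' is the identity on a list of ints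
      if fs.any (fun f => f < 1) then []  -- raise ValueError (excluded by Pre_)
      else if fs.prod ≠ total then []     -- raise ValueError (excluded by Pre_)
      else fs

-- ===== PORT B =====
-- 'k = (total & -total).bit_length() - 1' is written inline below (Nat subtraction; k ≥ 0)
def normalize_factors_py_alt (total : Int) (factors : Option (List Int)) (name : String) : List Int :=
  if total < 1 then []  -- raise ValueError (excluded by Pre_)
  else
    match factors with
    | none =>
      if total = 1 then []
      else  -- '(2,) * k + ((remaining,) if remaining > 1 else ())' with remaining = total >> k
        List.replicate (PySem.Int.bitLength (PySem.Int.band total (-total)) - 1) 2 ++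
          (if total >>> (PySem.Int.bitLength (PySem.Int.band total (-total)) - 1) > 1
           then [total >>> (PySem.Int.bitLength (PySem.Int.band total (-total)) - 1)] else [])
    | some fs =>
      if fs.any (fun f => f < 1) then []  -- raise ValueError (excluded by Pre_)
      else if fs.prod ≠ total then []     -- raise ValueError (excluded by Pre_)
      else fs

-- ===== PRECONDITION & SPEC =====
-- Pre_ excludes exactly the inputs on which A raises ValueError: total < 1, or an
-- explicit factor list containing a factor < 1 or whose product is not total.
def Pre_normalize_factors_py (total : Int) (factors : Option (List Int)) (name : String) : Prop :=
  1 ≤ total ∧ ∀ fs ∈ factors, (∀ f ∈ fs, 1 ≤ f) ∧ fs.prod = total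
instance (total : Int) (factors : Option (List Int)) (name : String) : Decidable (Pre_normalize_factors_py total factors name) := by unfold Pre_normalize_factors_py; infer_instance

def pvWitness_normalize_factors_py : Int × Option (List Int) × String := (12, none, "size")

def Spec_normalize_factors_py (total : Int) (factors : Option (List Int)) (name : String) (out : List Int) : Prop := out = normalize_factors_py_alt total factors name
instance (total : Int) (factors : Option (List Int)) (name : String) (out : List Int) : Decidable (Spec_normalize_factors_py total factors name out) := by unfold Spec_normalize_factors_py; infer_instance

-- ===== CLAIM (what is proved, stated in full; the proofs are below) =====
def Claim_equal_normalize_factors_py : Prop := ∀ (total : Int) (factors : Option (List Int)) (name : String), Dom_normalize_factors_py total factors name → Pre_normalize_factors_py total factors name → Spec_normalize_factors_py total factors name (normalize_factors_py total factors name)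

-- ===== LEMMAS AND PROOFS =====

-- bit facts on Nat
theorem pv_land_odd (j : Nat) : (2 * j + 1) &&& (2 * j) = 2 * j := by
  apply Nat.eq_of_testBit_eq
  intro i
  cases i with
  | zero => simp [Nat.testBit_zero]
  | succ i =>
    rw [Nat.testBit_land]
    simp only [Nat.testBit_succ]
    have h1 : (2 * j + 1) / 2 = j := by omega
    have h2 : 2 * j / 2 = j := by omega
    rw [h1, h2, Bool.and_self]

theorem pv_land_even (j : Nat) (hj : 1 ≤ j) :
    (2 * j) &&& (2 * j - 1) = 2 * (j &&& (j - 1)) := by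
  apply Nat.eq_of_testBit_eq
  intro i
  cases i with
  | zero => simp [Nat.testBit_zero]
  | succ i =>
    rw [Nat.testBit_land]
    simp only [Nat.testBit_succ]
    have h1 : 2 * j / 2 = j := by omega
    have h2 : (2 * j - 1) / 2 = j - 1 := by omega
    have h3 : 2 * (j &&& (j - 1)) / 2 = j &&& (j - 1) := by omega
    rw [h1, h2, h3, Nat.testBit_land]

-- m - (m &&& (m-1)) is the lowest set bit of m; it is positive
theorem pv_diff_pos (m : Nat) (h : 1 ≤ m) : 1 ≤ m - (m &&& (m - 1)) := by
  induction m using Nat.strong_induction_on with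
  | _ m ih =>
    by_cases hpar : m % 2 = 0
    · obtain ⟨j, rfl⟩ : ∃ j, m = 2 * j := ⟨m / 2, by omega⟩
      have hj1 : 1 ≤ j := by omega
      have h1 := pv_land_even j hj1
      have h2 := ih j (by omega) hj1
      omega
    · obtain ⟨j, rfl⟩ : ∃ j, m = 2 * j + 1 := ⟨m / 2, by omega⟩
      simp only [Nat.add_sub_cancel]
      have := pv_land_odd j
      omega

-- PySem.Int.band n (-n) for positive n, at the Nat level
theorem pv_band_neg (m : Nat) (h : 1 ≤ m) :
    PySem.Int.band (m : Int) (-(m : Int)) = ((m - (m &&& (m - 1)) : Nat) : Int) := by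
  have h0 : (0 : Int) ≤ (m : Int) := by positivity
  have h1 : ¬ (0 : Int) ≤ -(m : Int) := by
    have : (1 : Int) ≤ (m : Int) := by exact_mod_cast h
    omega
  simp only [PySem.Int.band, if_pos h0, if_neg h1, neg_neg]
  congr 1
  have h2 : ((m : Int) - 1).toNat = m - 1 := by omega
  rw [h2, Int.toNat_natCast]

-- the k that B computes, as a function of the Nat value of total
def pvK (m : Nat) : Nat := PySem.Int.bitLength ((m - (m &&& (m - 1)) : Nat) : Int) - 1

theorem pvK_odd (j : Nat) : pvK (2 * j + 1) = 0 := by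
  unfold pvK
  have h : (2 * j + 1) - ((2 * j + 1) &&& (2 * j + 1 - 1)) = 1 := by
    simp only [Nat.add_sub_cancel]
    have := pv_land_odd j
    omega
  rw [h]
  decide

theorem pvK_even (j : Nat) (hj : 1 ≤ j) : pvK (2 * j) = pvK j + 1 := by
  unfold pvK
  have h : (2 * j) - ((2 * j) &&& (2 * j - 1)) = 2 * (j - (j &&& (j - 1))) := by
    have h1 := pv_land_even j hj
    have h2 : 1 ≤ j - (j &&& (j - 1)) := pv_diff_pos j hj
    omega
  rw [h]
  have hp : 0 < 2 * (j - (j &&& (j - 1))) := by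
    have := pv_diff_pos j hj; omega
  rw [PySem.Int.bitLength_natCast hp]
  have h3 : 2 * (j - (j &&& (j - 1))) / 2 = j - (j &&& (j - 1)) := by omega
  rw [h3]
  have h4 : 1 ≤ PySem.Int.bitLength ((j - (j &&& (j - 1)) : Nat) : Int) := by
    rw [PySem.Int.bitLength_natCast (by have := pv_diff_pos j hj; omega)]
    omega
  omega

theorem pv_shift_natCast (m k : Nat) : ((m : Int) >>> k) = ((m >>> k : Nat) : Int) := by
  simp [Int.shiftRight_eq_div_pow, Nat.shiftRight_eq_div_pow]

-- main loop characterization: A's loop computes total >> k and k twos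
theorem pv_loop_eq (m : Nat) (h : 1 ≤ m) :
    ∀ out, pvA_loop (m : Int) out = ((m : Int) >>> pvK m, out ++ List.replicate (pvK m) 2) := by
  induction m using Nat.strong_induction_on with
  | _ m ih =>
    intro out
    by_cases hpar : m % 2 = 0
    · obtain ⟨j, rfl⟩ : ∃ j, m = 2 * j := ⟨m / 2, by omega⟩
      have hj1 : 1 ≤ j := by omega
      rw [pvA_loop]
      have hmod : PySem.Int.mod ((2 * j : Nat) : Int) 2 = 0 := by
        simp
      have hgt : ((2 * j : Nat) : Int) > 1 := by exact_mod_cast (by omega : (1 : Nat) < 2 * j)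
      rw [if_pos ⟨hmod, hgt⟩]
      have hd : PySem.Int.floordiv ((2 * j : Nat) : Int) 2 = ((j : Nat) : Int) := by
        simp
      rw [hd, ih j (by omega) hj1 (out ++ [2]), pvK_even j hj1]
      refine Prod.ext ?_ ?_
      · -- total >> (k+1) = (total/2) >> k
        show ((j : Nat) : Int) >>> pvK j = ((2 * j : Nat) : Int) >>> (pvK j + 1)
        rw [pv_shift_natCast, pv_shift_natCast]
        congr 1
        simp only [Nat.shiftRight_eq_div_pow, pow_succ]
        rw [Nat.mul_comm (2 ^ pvK j) 2, ← Nat.div_div_eq_div_mul]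
        have h1 : 2 * j / 2 = j := by omega
        rw [h1]
      · show out ++ [2] ++ List.replicate (pvK j) 2 = out ++ List.replicate (pvK j + 1) 2
        rw [List.append_assoc]
        congr 1
    · obtain ⟨j, rfl⟩ : ∃ j, m = 2 * j + 1 := ⟨m / 2, by omega⟩
      rw [pvA_loop]
      have hc : ¬ (PySem.Int.mod ((2 * j + 1 : Nat) : Int) 2 = 0 ∧ ((2 * j + 1 : Nat) : Int) > 1) := by
        intro ⟨h1, _⟩
        simp at h1
      rw [if_neg hc, pvK_odd]
      simp

-- ===== VERDICT (by name: the statement is the Claim_ definition above) =====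
theorem normalize_factors_py_spec : Claim_equal_normalize_factors_py := by
  intro total factors name _hdom hpre
  obtain ⟨htot, hf⟩ := hpre
  have hnl : ¬ total < 1 := by omega
  unfold Spec_normalize_factors_py
  cases factors with
  | none =>
    simp only [normalize_factors_py, normalize_factors_py_alt, if_neg hnl]
    by_cases h1 : total = 1
    · simp [h1]
    · simp only [if_neg h1]
      have hm : total = ((total.toNat : Nat) : Int) := by omega
      have hm1 : 1 ≤ total.toNat := by omega
      rw [hm, pv_loop_eq total.toNat hm1 []]
      rw [show PySem.Int.bitLength (PySem.Int.band ((total.toNat : Nat) : Int) (-((total.toNat : Nat) : Int))) - 1 = pvK total.toNat from by rw [pv_band_neg total.toNat hm1]; rfl]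
      simp only [List.nil_append]
      split <;> simp
  | some fs =>
    have hall := (hf fs rfl).1
    have hprod := (hf fs rfl).2
    have hany : (fs.any fun f => decide (f < 1)) = false := by
      simp only [List.any_eq_false]
      intro f hfm
      simpa using hall f hfm
    simp [normalize_factors_py, normalize_factors_py_alt, if_neg hnl, hany, hprod]
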